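-- pv_equiv track=rewrite | github.com/ianre/DSA-Thread-Sampling | Thread_Sampling.py | extendFirstLast
-- ===== SOURCE A (Python) =====
-- def extendFirstLast(l_s):
--     for i in range(len(l_s)):
--         if(l_s[i] >0):
--             l_s[0]=l_s[i];
--             break;
--     for i in range(len(l_s)-1,-1,-1):
--         if(l_s[i] >0):
--             l_s[len(l_s)-1]=l_s[i];
--             break;
--
--     return l_s;
-- ===== SOURCE B (Python) =====
-- def extendFirstLast(l_s):
--     pos = [x for x in l_s if x > 0]
--     if pos:
--         l_s[0] = pos[0]
--         l_s[len(l_s) - 1] = pos[-1]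
--     return l_s
-- ===== Notes on version B (the rewrite author's own statement) =====
-- stated objective: simpler
-- what changed: Replaces A's two early-terminating index scans (forward and reverse over the mutated list) with a single pass that collects all positive values and assigns the endpoints from the first and last of that list.
import Mathlib
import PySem

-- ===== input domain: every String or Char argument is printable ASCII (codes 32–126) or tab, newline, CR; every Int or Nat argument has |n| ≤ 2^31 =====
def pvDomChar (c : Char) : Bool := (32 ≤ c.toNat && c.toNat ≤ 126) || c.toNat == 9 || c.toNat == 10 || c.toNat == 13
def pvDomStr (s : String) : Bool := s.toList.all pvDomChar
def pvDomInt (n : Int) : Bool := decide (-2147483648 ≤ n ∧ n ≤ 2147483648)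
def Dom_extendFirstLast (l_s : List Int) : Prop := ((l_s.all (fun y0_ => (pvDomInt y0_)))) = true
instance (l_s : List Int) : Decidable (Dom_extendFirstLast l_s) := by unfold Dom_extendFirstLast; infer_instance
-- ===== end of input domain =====

-- B replaces A's two early-terminating index scans with one pass collecting the
-- positive values and assigning the endpoints from its first/last element (objective:
-- simpler). A mutates its argument in place; the equivalence is about the return value.

-- ===== PORT A =====
-- first loop: for i in range(len(l_s)): if l_s[i] > 0: l_s[0] = l_s[i]; break
def pvLoopFwd (l : List Int) : List Int → List Int
  | [] => l
  | i :: rest =>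
    let v := PySem.List.pyGetD l i 0   -- index from range(len), always in range
    if v > 0 then l.set 0 v else pvLoopFwd l rest

-- second loop: for i in range(len(l_s)-1, -1, -1): if l_s[i] > 0: l_s[len(l_s)-1] = l_s[i]; break
def pvLoopBwd (l : List Int) : List Int → List Int
  | [] => l
  | i :: rest =>
    let v := PySem.List.pyGetD l i 0
    if v > 0 then l.set (l.length - 1) v else pvLoopBwd l rest

def extendFirstLast (l_s : List Int) : List Int :=
  let l1 := pvLoopFwd l_s (PySem.List.pyRange 0 l_s.length 1)
  pvLoopBwd l1 (PySem.List.pyRange ((l1.length : Int) - 1) (-1) (-1))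

-- ===== PORT B =====
def extendFirstLast_alt (l_s : List Int) : List Int :=
  let pos := l_s.filter (fun x => x > 0)
  match pos with
  | [] => l_s
  | p :: _ =>
    let l1 := l_s.set 0 p
    l1.set (l1.length - 1) (pos.getLastD 0)   -- pos[-1]; pos is non-empty here

-- ===== PRECONDITION & SPEC =====
def Spec_extendFirstLast (l_s : List Int) (out : List Int) : Prop := out = extendFirstLast_alt l_s
instance (l_s : List Int) (out : List Int) : Decidable (Spec_extendFirstLast l_s out) := by unfold Spec_extendFirstLast; infer_instance

-- ===== CLAIM (what is proved, stated in full; the proofs are below) =====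
def Claim_equal_extendFirstLast : Prop := ∀ (l_s : List Int), Dom_extendFirstLast l_s → Spec_extendFirstLast l_s (extendFirstLast l_s)

-- ===== LEMMAS AND PROOFS =====

-- the forward scan from index j computes: set l[0] to the first positive of l.drop j (if any)
theorem pvLoopFwd_eq (l : List Int) : ∀ (d j : Nat), l.length - j = d →
    pvLoopFwd l (PySem.List.pyRange (j : Int) l.length 1) =
      (match (l.drop j).filter (fun x => x > 0) with
       | [] => l
       | p :: _ => l.set 0 p) := by
  intro d
  induction d with
  | zero =>
    intro j hj
    have hle : l.length ≤ j := by omega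
    rw [PySem.List.pyRange_one_eq_nil (by exact_mod_cast hle)]
    rw [List.drop_eq_nil_of_le hle]
    simp [pvLoopFwd]
  | succ d ih =>
    intro j hj
    have hlt : j < l.length := by omega
    rw [PySem.List.pyRange_one_cons (by exact_mod_cast hlt)]
    rw [List.drop_eq_getElem_cons hlt]
    simp only [pvLoopFwd, PySem.List.pyGetD_natCast, List.getD_eq_getElem?_getD,
      List.getElem?_eq_getElem hlt, Option.getD_some, List.filter_cons]
    by_cases hp : l[j] > 0
    · simp [hp]
    · have hc : ((j : Int) + 1) = ((j + 1 : Nat) : Int) := by push_cast; ring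
      simp only [hp, decide_false, Bool.false_eq_true, if_false]
      rw [hc, ih (j + 1) (by omega)]

-- the backward scan over indices j-1 … 0 computes: set l[len-1] to the last positive of l.take j (if any)
theorem pvLoopBwd_eq (l : List Int) : ∀ (j : Nat), j ≤ l.length →
    pvLoopBwd l (PySem.List.pyRange ((j : Int) - 1) (-1) (-1)) =
      (match ((l.take j).filter (fun x => x > 0)).getLast? with
       | none => l
       | some p => l.set (l.length - 1) p) := by
  intro j
  induction j with
  | zero =>
    intro _
    rw [PySem.List.pyRange_neg_one_eq_nil (by norm_num)]
    simp [pvLoopBwd]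
  | succ j ih =>
    intro hj
    have hlt : j < l.length := by omega
    have hcast : ((j + 1 : Nat) : Int) - 1 = (j : Nat) := by push_cast; ring
    rw [hcast, PySem.List.pyRange_neg_one_cons (by omega)]
    rw [List.take_add_one, List.getElem?_eq_getElem hlt]
    simp only [pvLoopBwd, PySem.List.pyGetD_natCast, List.getD_eq_getElem?_getD,
      List.getElem?_eq_getElem hlt, Option.getD_some, Option.toList_some,
      List.filter_append, List.filter_cons, List.filter_nil]
    by_cases hp : l[j] > 0
    · simp [hp]
    · simp only [hp, decide_false, Bool.false_eq_true, if_false, List.append_nil]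
      rw [ih (by omega)]

-- setting index 0 to the first positive value does not change the last positive value
theorem filter_set0_getLast? (l : List Int) (p : Int) (ps : List Int)
    (h : l.filter (fun x => x > 0) = p :: ps) :
    ((l.set 0 p).filter (fun x => x > 0)).getLast? =
      (l.filter (fun x => x > 0)).getLast? := by
  have hp : p > 0 := by
    have hm : p ∈ l.filter (fun x => x > 0) := by rw [h]; exact List.mem_cons_self
    simpa using (List.of_mem_filter hm)
  cases l with
  | nil => simp at h
  | cons x t =>
    simp only [List.set_cons_zero]
    by_cases hx : x > 0
    · have : p = x := by
        have := h
        simp only [List.filter_cons, hx, decide_true, if_pos] at this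
        exact (List.cons.injEq _ _ _ _ ▸ this).1.symm
      rw [this]
    · have ht : t.filter (fun x => x > 0) = p :: ps := by
        have := h
        simpa [List.filter_cons, hx] using this
      simp only [List.filter_cons, hp, hx, decide_true, decide_false, ite_true,
        Bool.false_eq_true, if_false, ht]
      exact List.getLast?_cons_cons

-- ===== VERDICT (by name: the statement is the Claim_ definition above) =====
theorem extendFirstLast_spec : Claim_equal_extendFirstLast := by
  intro l _
  unfold Spec_extendFirstLast extendFirstLast extendFirstLast_alt
  have h0 : (0 : Int) = ((0 : Nat) : Int) := by norm_num
  rw [h0, pvLoopFwd_eq l l.length 0 (by omega)]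
  simp only [List.drop_zero]
  cases hf : l.filter (fun x => x > 0) with
  | nil =>
    rw [pvLoopBwd_eq l l.length (le_refl _)]
    simp [List.take_length, hf]
  | cons p ps =>
    have hlen : (l.set 0 p).length = l.length := by simp
    rw [show ((l.set 0 p).length : Int) - 1 = (((l.set 0 p).length : Nat) : Int) - 1 from rfl,
      pvLoopBwd_eq (l.set 0 p) (l.set 0 p).length (le_refl _)]
    rw [List.take_length, filter_set0_getLast? l p ps hf, hf]
    cases hq : (p :: ps).getLast? with
    | none => simp at hq
    | some q =>
      simp only [hq, hlen, List.getLastD_eq_getLast?, Option.getD_some]
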